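-- pv_equiv track=rewrite | github.com/drkplaya777/bctci | grids and matrices/subgrid_sums_optimal.py | backward_sum
-- ===== SOURCE A (Python) =====
-- def backward_sum(grid):
--     R,C = len(grid), len(grid[0])
--     res = [row.copy() for row in grid]
--     for r in range(R - 1, -1, -1):
--         for c in range(C - 1, -1, -1):
--             if r + 1 < R:
--                 res[r][c] += res[r + 1][c]
--             if c + 1 < C:
--                 res[r][c] += res[r][c + 1]
--             if r + 1 < R and c + 1 < C:
--                 res[r][c] -= res[r + 1][c + 1]
--     return res
-- ===== SOURCE B (Python) =====
-- def backward_sum(grid):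
--     # Two separable in-place passes: rightward suffix sums within each row,
--     # then a bottom-up accumulation of the row below.
--     R, C = len(grid), len(grid[0])
--     res = [row.copy() for row in grid]
--     for row in res:
--         for c in range(C - 2, -1, -1):
--             row[c] += row[c + 1]
--     for r in range(R - 2, -1, -1):
--         for c in range(C):
--             res[r][c] += res[r + 1][c]
--     return res
-- ===== Notes on version B (the rewrite author's own statement) =====
-- stated objective: alternative
-- what changed: Replaces A's single backward pass with three-term inclusion-exclusion per cell by two separable single-direction in-place passes: rightward suffix sums within each row, then a bottom-up pass adding the row below pointwise; Pre_ excludes only the inputs where both programs raise IndexError (the empty grid and grids with a row shorter than the first).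
import Mathlib
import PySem

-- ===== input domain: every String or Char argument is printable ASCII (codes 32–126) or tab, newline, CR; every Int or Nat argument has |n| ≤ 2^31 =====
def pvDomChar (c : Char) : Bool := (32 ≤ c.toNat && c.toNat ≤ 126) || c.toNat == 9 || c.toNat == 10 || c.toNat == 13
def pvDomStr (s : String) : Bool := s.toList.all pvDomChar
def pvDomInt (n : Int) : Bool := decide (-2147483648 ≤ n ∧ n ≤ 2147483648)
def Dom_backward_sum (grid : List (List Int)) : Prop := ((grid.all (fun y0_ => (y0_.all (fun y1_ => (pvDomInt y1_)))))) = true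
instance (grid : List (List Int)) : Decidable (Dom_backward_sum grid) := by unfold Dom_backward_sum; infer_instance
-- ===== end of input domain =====

-- B computes the same 2D suffix sums by two separable single-direction in-place
-- passes — rightward suffix sums within each row, then a bottom-up pass adding the
-- row below — instead of A's single pass with three-term inclusion-exclusion per cell.

-- ===== PORT A =====
def pvGet2 (res : List (List Int)) (r c : Nat) : Int := (res.getD r []).getD c 0

def pvSet2 (res : List (List Int)) (r c : Nat) (v : Int) : List (List Int) :=
  res.set r ((res.getD r []).set c v)

-- one body of the inner loop: the three conditional `res[r][c] += / -=` statements
def pvColStep (R C r : Int) (res : List (List Int)) (c : Int) : List (List Int) :=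
  let res := if r + 1 < R then
      pvSet2 res r.toNat c.toNat (pvGet2 res r.toNat c.toNat + pvGet2 res (r+1).toNat c.toNat)
    else res
  let res := if c + 1 < C then
      pvSet2 res r.toNat c.toNat (pvGet2 res r.toNat c.toNat + pvGet2 res r.toNat (c+1).toNat)
    else res
  if r + 1 < R ∧ c + 1 < C then
      pvSet2 res r.toNat c.toNat (pvGet2 res r.toNat c.toNat - pvGet2 res (r+1).toNat (c+1).toNat)
  else res

def backward_sum (grid : List (List Int)) : List (List Int) :=
  let R : Int := grid.length
  -- Python reads len(grid[0]); on the empty grid that raises (excluded by Pre_)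
  let C : Int := (grid.headD []).length
  let res := grid.map (fun row => row)   -- row.copy()
  (PySem.List.pyRange (R - 1) (-1) (-1)).foldl (fun res r =>
    (PySem.List.pyRange (C - 1) (-1) (-1)).foldl (pvColStep R C r) res) res

-- ===== PORT B =====
-- first pass, one row: `row[c] += row[c+1]` for c from C-2 down to 0
def pvPass1Step (row : List Int) (c : Int) : List Int :=
  row.set c.toNat (row.getD c.toNat 0 + row.getD (c+1).toNat 0)

def pvPass1 (C : Int) (row : List Int) : List Int :=
  (PySem.List.pyRange (C - 2) (-1) (-1)).foldl pvPass1Step row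

-- second pass, one cell: `res[r][c] += res[r+1][c]`
def pvRowAdd (res : List (List Int)) (r c : Int) : List (List Int) :=
  pvSet2 res r.toNat c.toNat (pvGet2 res r.toNat c.toNat + pvGet2 res (r+1).toNat c.toNat)

def backward_sum_alt (grid : List (List Int)) : List (List Int) :=
  let R : Int := grid.length
  -- len(grid[0]); raises on the empty grid like A (excluded by Pre_)
  let C : Int := (grid.headD []).length
  let res := grid.map (pvPass1 C)   -- row.copy() then the in-place suffix pass
  (PySem.List.pyRange (R - 2) (-1) (-1)).foldl (fun res r =>
    (PySem.List.pyRange 0 C 1).foldl (fun res c => pvRowAdd res r c) res) res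

-- ===== PRECONDITION & SPEC =====
-- Pre_ excludes exactly the inputs on which A (and B) raise IndexError: the empty
-- grid (len(grid[0])) and grids in which some row is shorter than the first row.
def Pre_backward_sum (grid : List (List Int)) : Prop :=
  grid ≠ [] ∧ ∀ row ∈ grid, (grid.headD []).length ≤ row.length
instance (grid : List (List Int)) : Decidable (Pre_backward_sum grid) := by
  unfold Pre_backward_sum; infer_instance

def pvWitness_backward_sum : List (List Int) := [[1, 2], [3, 4]]

def Spec_backward_sum (grid : List (List Int)) (out : List (List Int)) : Prop := out = backward_sum_alt grid
instance (grid : List (List Int)) (out : List (List Int)) : Decidable (Spec_backward_sum grid out) := by unfold Spec_backward_sum; infer_instance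

-- ===== CLAIM (what is proved, stated in full; the proofs are below) =====
def Claim_equal_backward_sum : Prop := ∀ (grid : List (List Int)), Dom_backward_sum grid → Pre_backward_sum grid → Spec_backward_sum grid (backward_sum grid)

-- ===== LEMMAS AND PROOFS =====

-- reference spec: suffix sums of one row
def sufSpec : List Int → List Int
  | [] => []
  | x :: t => (x + t.sum) :: sufSpec t

def addRows (a b : List Int) : List Int := (a.zip b).map (fun p => p.1 + p.2)

-- reference spec: the accumulated rows (width C)
def coreS (C : Nat) : List (List Int) → List (List Int)
  | [] => []
  | row :: rest =>
      (match coreS C rest with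
        | [] => sufSpec (row.take C)
        | h :: _ => addRows (sufSpec (row.take C)) h) :: coreS C rest

-- reference spec: the output rows
def wideS (C : Nat) : List (List Int) → List (List Int)
  | [] => []
  | row :: rest =>
      ((match coreS C rest with
        | [] => sufSpec (row.take C)
        | h :: _ => addRows (sufSpec (row.take C)) h)
        ++ row.drop C) :: wideS C rest

theorem sufSpec_length (l : List Int) : (sufSpec l).length = l.length := by
  induction l with
  | nil => rfl
  | cons x t ih => simp [sufSpec, ih]

theorem addRows_length (a b : List Int) (h : a.length = b.length) :
    (addRows a b).length = a.length := by
  simp [addRows, h]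

theorem wideS_length (C : Nat) (g : List (List Int)) : (wideS C g).length = g.length := by
  induction g with
  | nil => rfl
  | cons row rest ih => simp [wideS, ih]

theorem coreS_rect (C : Nat) (g : List (List Int)) (h : ∀ row ∈ g, C ≤ row.length) :
    ∀ row ∈ coreS C g, row.length = C := by
  induction g with
  | nil => simp [coreS]
  | cons row rest ih =>
      have hrest := ih (fun r hr => h r (List.mem_cons_of_mem _ hr))
      have hhead : (sufSpec (row.take C)).length = C := by
        rw [sufSpec_length, List.length_take]
        have := h row (List.mem_cons_self)
        omega
      intro s hs
      rw [coreS] at hs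
      rcases List.mem_cons.mp hs with h1 | h2
      · subst h1
        cases hm : coreS C rest with
        | nil => simpa using hhead
        | cons b tb =>
            show (addRows (sufSpec (row.take C)) b).length = C
            rw [addRows_length _ _ (by
              rw [hhead, hrest b (by rw [hm]; exact List.mem_cons_self)]), hhead]
      · exact hrest s h2

-- ---- A-side ----

-- small getD helpers
theorem getD_append_left' {α : Type} (l l' : List α) (n : Nat) (d : α) (h : n < l.length) :
    (l ++ l').getD n d = l.getD n d := by
  rw [List.getD_eq_getElem?_getD, List.getD_eq_getElem?_getD, List.getElem?_append_left h]

theorem getD_append_right' {α : Type} (l l' : List α) (n : Nat) (d : α) (h : l.length ≤ n) :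
    (l ++ l').getD n d = l'.getD (n - l.length) d := by
  rw [List.getD_eq_getElem?_getD, List.getD_eq_getElem?_getD, List.getElem?_append_right h]

theorem getD_take' {α : Type} (l : List α) (m n : Nat) (d : α) (h : n < m) :
    (l.take m).getD n d = l.getD n d := by
  rw [List.getD_eq_getElem?_getD, List.getD_eq_getElem?_getD, List.getElem?_take_of_lt h]

theorem getD_set_self' {α : Type} (l : List α) (n : Nat) (v d : α) (h : n < l.length) :
    (l.set n v).getD n d = v := by
  simp [List.getD_eq_getElem?_getD, List.getElem?_set_self', List.getElem?_eq_getElem h]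

theorem getD_set_ne' {α : Type} (l : List α) (n : Nat) (v d : α) (m : Nat) (h : n ≠ m) :
    (l.set n v).getD m d = l.getD m d := by
  rw [List.getD_eq_getElem?_getD, List.getD_eq_getElem?_getD, List.getElem?_set_ne h]

theorem set_getD_self' {α : Type} (l : List α) (n : Nat) (d : α) (h : n < l.length) :
    l.set n (l.getD n d) = l := by
  rw [List.getD_eq_getElem l d h, List.set_getElem_self]

theorem sufSpec_getD (l : List Int) : ∀ c : Nat, c < l.length →
    (sufSpec l).getD c 0 = l.getD c 0 +
      (if c + 1 < l.length then (sufSpec l).getD (c+1) 0 else 0) := by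
  induction l with
  | nil => simp
  | cons x t ih =>
      intro c hc
      cases c with
      | zero =>
          cases t with
          | nil => simp [sufSpec]
          | cons y u => simp [sufSpec]
      | succ c =>
          simp only [sufSpec, List.getD_cons_succ, List.length_cons]
          have := ih c (by simpa using hc)
          rw [this]
          simp

theorem addRows_getD (a b : List Int) (h : a.length = b.length) (c : Nat) (hc : c < a.length) :
    (addRows a b).getD c 0 = a.getD c 0 + b.getD c 0 := by
  have hz : c < (a.zip b).length := by simp [List.length_zip]; omega
  rw [List.getD_eq_getElem?_getD, List.getD_eq_getElem?_getD, List.getD_eq_getElem?_getD]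
  simp only [addRows, List.getElem?_map]
  rw [List.getElem?_eq_getElem hz, List.getElem?_eq_getElem hc,
    List.getElem?_eq_getElem (show c < b.length by omega)]
  simp [List.getElem_zip]

theorem set_middle {α : Type} (p : List α) (x y : α) (q : List α) :
    (p ++ x :: q).set p.length y = p ++ y :: q := by
  induction p with
  | nil => rfl
  | cons z t ih => simp [ih]

theorem pvSet2_length (res : List (List Int)) (r c : Nat) (v : Int) :
    (pvSet2 res r c v).length = res.length := by
  simp [pvSet2]

theorem getD_row_set_ne (res : List (List Int)) (r c : Nat) (v : Int) (r' : Nat) (h : r' ≠ r) :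
    (pvSet2 res r c v).getD r' [] = res.getD r' [] := by
  unfold pvSet2
  exact getD_set_ne' res r _ [] r' (Ne.symm h)

theorem getD_row_set_self (res : List (List Int)) (r c : Nat) (v : Int) (h : r < res.length) :
    (pvSet2 res r c v).getD r [] = (res.getD r []).set c v := by
  unfold pvSet2
  exact getD_set_self' res r _ [] h

theorem pvGet2_set_self (res : List (List Int)) (r c : Nat) (v : Int)
    (hr : r < res.length) (hc : c < (res.getD r []).length) :
    pvGet2 (pvSet2 res r c v) r c = v := by
  unfold pvGet2
  rw [getD_row_set_self res r c v hr]
  exact getD_set_self' _ c v 0 hc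

theorem pvGet2_set_ne_col (res : List (List Int)) (r c : Nat) (v : Int) (c' : Nat) (h : c' ≠ c) :
    pvGet2 (pvSet2 res r c v) r c' = pvGet2 res r c' := by
  unfold pvGet2
  by_cases hr : r < res.length
  · rw [getD_row_set_self res r c v hr, getD_set_ne' _ c v 0 c' (Ne.symm h)]
  · rw [pvSet2, List.set_eq_of_length_le (by omega)]

theorem pvGet2_set_ne_row (res : List (List Int)) (r c : Nat) (v : Int) (r' c' : Nat) (h : r' ≠ r) :
    pvGet2 (pvSet2 res r c v) r' c' = pvGet2 res r' c' := by
  unfold pvGet2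
  rw [getD_row_set_ne res r c v r' h]

theorem pvSet2_pvSet2 (res : List (List Int)) (r c : Nat) (v w : Int) :
    pvSet2 (pvSet2 res r c v) r c w = pvSet2 res r c w := by
  by_cases hr : r < res.length
  · unfold pvSet2
    rw [getD_set_self' res r _ [] hr, List.set_set, List.set_set]
  · have h0 : pvSet2 res r c v = res := by
      unfold pvSet2; exact List.set_eq_of_length_le (by omega)
    rw [h0]

theorem pvColStep_eq (R C : Int) (res : List (List Int)) (r c : Nat)
    (hr : r < res.length) (hc : c < (res.getD r []).length) :
    pvColStep R C (r : Int) res (c : Int) =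
      pvSet2 res r c (pvGet2 res r c
        + (if (r : Int) + 1 < R then pvGet2 res (r+1) c else 0)
        + (if (c : Int) + 1 < C then pvGet2 res r (c+1) else 0)
        - (if (r : Int) + 1 < R ∧ (c : Int) + 1 < C then pvGet2 res (r+1) (c+1) else 0)) := by
  have hrt : ((r : Int)).toNat = r := by omega
  have hct : ((c : Int)).toNat = c := by omega
  have hr1 : ((r : Int) + 1).toNat = r + 1 := by omega
  have hc1 : ((c : Int) + 1).toNat = c + 1 := by omega
  unfold pvColStep
  simp only [hrt, hct, hr1, hc1]
  by_cases hA : (r : Int) + 1 < R <;> by_cases hB : (c : Int) + 1 < C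
  · simp only [hA, hB, and_self, if_true]
    rw [pvGet2_set_ne_col res r c _ (c+1) (by omega),
      pvGet2_set_self res r c _ hr hc]
    rw [pvGet2_set_ne_row (pvSet2 res r c (pvGet2 res r c + pvGet2 res (r+1) c)) r c
        (pvGet2 res r c + pvGet2 res (r+1) c + pvGet2 res r (c+1)) (r+1) (c+1) (by omega),
      pvGet2_set_ne_row res r c _ (r+1) (c+1) (by omega)]
    rw [pvGet2_set_self (pvSet2 res r c (pvGet2 res r c + pvGet2 res (r+1) c)) r c
        (pvGet2 res r c + pvGet2 res (r+1) c + pvGet2 res r (c+1))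
        (by rw [pvSet2_length]; exact hr)
        (by rw [getD_row_set_self res r c _ hr, List.length_set]; exact hc)]
    rw [pvSet2_pvSet2, pvSet2_pvSet2]
  · simp only [hA, hB, and_false, if_true, if_false, add_zero, sub_zero]
  · simp only [hA, hB, false_and, if_true, if_false, add_zero, sub_zero]
  · simp only [hA, hB, false_and, if_false, add_zero, sub_zero]
    unfold pvSet2 pvGet2
    rw [set_getD_self' _ c 0 hc, set_getD_self' res r [] hr]

theorem inner_loop (Cn : Nat) (res : List (List Int)) (k : Nat) (hk : k < res.length)
    (row T : List Int) (hrow : res.getD k [] = row) (hrl : Cn ≤ row.length)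
    (hTl : T.length = row.length) (hTt : T.drop Cn = row.drop Cn)
    (hrec : ∀ c : Nat, c < Cn → T.getD c 0 = row.getD c 0
      + (if (k : Int) + 1 < (res.length : Int) then (res.getD (k+1) []).getD c 0 else 0)
      + (if (c : Int) + 1 < (Cn : Int) then T.getD (c+1) 0 else 0)
      - (if (k : Int) + 1 < (res.length : Int) ∧ (c : Int) + 1 < (Cn : Int)
          then (res.getD (k+1) []).getD (c+1) 0 else 0)) :
    (PySem.List.pyRange ((Cn : Int) - 1) (-1) (-1)).foldl
        (pvColStep (res.length : Int) (Cn : Int) (k : Int)) res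
      = res.set k T := by
  have hinv : ∀ (m c : Nat), c + m = Cn →
      (PySem.List.pyRange (c : Int) (Cn : Int) 1).foldr
        (fun cc res' => pvColStep (res.length : Int) (Cn : Int) (k : Int) res' cc) res
      = res.set k (row.take c ++ T.drop c) := by
    intro m
    induction m with
    | zero =>
        intro c hceq
        have hcC : c = Cn := by omega
        subst hcC
        rw [PySem.List.pyRange_one_eq_nil (by omega)]
        simp only [List.foldr_nil]
        rw [hTt, List.take_append_drop, ← hrow, set_getD_self' res k [] hk]
    | succ m ih =>
        intro c hceq
        have hcC : c < Cn := by omega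
        rw [PySem.List.pyRange_one_cons (by omega), List.foldr_cons,
          show ((c : Int) + 1) = (((c+1 : Nat) : Int)) by push_cast; ring,
          ih (c+1) (by omega)]
        have hMk : (res.set k (row.take (c+1) ++ T.drop (c+1))).getD k []
            = row.take (c+1) ++ T.drop (c+1) := getD_set_self' res k _ [] hk
        have htl : (row.take (c+1)).length = c + 1 := by
          rw [List.length_take]; omega
        have hrowlen : c < ((res.set k (row.take (c+1) ++ T.drop (c+1))).getD k []).length := by
          rw [hMk, List.length_append, htl]; omega
        rw [pvColStep_eq ((res.length : Int)) ((Cn : Int))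
          (res.set k (row.take (c+1) ++ T.drop (c+1))) k c
          (by simp only [List.length_set]; exact hk) hrowlen]
        have hread_rc : pvGet2 (res.set k (row.take (c+1) ++ T.drop (c+1))) k c = row.getD c 0 := by
          unfold pvGet2
          rw [hMk, getD_append_left' _ _ c 0 (by omega), getD_take' row (c+1) c 0 (by omega)]
        have hread_below : ∀ c' : Nat,
            pvGet2 (res.set k (row.take (c+1) ++ T.drop (c+1))) (k+1) c'
              = (res.getD (k+1) []).getD c' 0 := by
          intro c'
          unfold pvGet2
          rw [getD_set_ne' res k _ [] (k+1) (by omega)]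
        have hread_next : pvGet2 (res.set k (row.take (c+1) ++ T.drop (c+1))) k (c+1)
            = T.getD (c+1) 0 := by
          unfold pvGet2
          rw [hMk, getD_append_right' _ _ (c+1) 0 (by omega), htl, Nat.sub_self,
            List.getD_eq_getElem?_getD, List.getD_eq_getElem?_getD, List.getElem?_drop]
        have hset : ∀ v : Int, pvSet2 (res.set k (row.take (c+1) ++ T.drop (c+1))) k c v
            = res.set k ((row.take (c+1) ++ T.drop (c+1)).set c v) := by
          intro v
          unfold pvSet2
          rw [hMk, List.set_set]
        rw [hread_rc, hread_below c, hread_next, hread_below (c+1), hset]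
        have hTc : (row.take (c+1) ++ T.drop (c+1)).set c (T.getD c 0)
            = row.take c ++ T.drop c := by
          have h1 : row.take (c+1) = row.take c ++ [row.getD c 0] := by
            rw [List.take_add_one, List.getElem?_eq_getElem (by omega : c < row.length),
              List.getD_eq_getElem row 0 (by omega : c < row.length)]
            simp
          have hgT : T.getD c 0 = T[c]'(by omega) :=
            List.getD_eq_getElem T 0 (by omega)
          have h2 : T.drop c = T.getD c 0 :: T.drop (c+1) := by
            rw [hgT]
            exact List.drop_eq_getElem_cons (by omega)
          have hlen : (row.take c).length = c := by rw [List.length_take]; omega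
          have h3 := set_middle (row.take c) (row.getD c 0) (T.getD c 0) (T.drop (c+1))
          rw [hlen] at h3
          rw [h1, List.append_assoc, List.singleton_append, h3, h2]
        rw [← hrec c hcC, hTc]
  have e1 : ((Cn : Int) - 1) + 1 = (Cn : Int) := by ring
  have e2 : ((-1 : Int)) + 1 = 0 := by norm_num
  rw [PySem.List.pyRange_neg_one_eq_reverse, e1, e2, List.foldl_reverse,
    show (0 : Int) = ((0 : Nat) : Int) by norm_num, hinv Cn 0 (by omega)]
  simp

theorem outer_loop (g : List (List Int)) (Cn : Nat)
    (hge : ∀ row ∈ g, Cn ≤ row.length) :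
    ∀ (n k : Nat), k + n = g.length →
    (PySem.List.pyRange (k : Int) (g.length : Int) 1).foldr
        (fun r res => (PySem.List.pyRange ((Cn : Int) - 1) (-1) (-1)).foldl
          (pvColStep (g.length : Int) (Cn : Int) r) res) g
      = g.take k ++ wideS Cn (g.drop k) := by
  intro n
  induction n with
  | zero =>
      intro k hkeq
      rw [PySem.List.pyRange_one_eq_nil (by omega)]
      simp only [List.foldr_nil]
      rw [List.take_of_length_le (by omega), List.drop_eq_nil_of_le (by omega)]
      simp [wideS]
  | succ n ih =>
      intro k hkeq
      have hkR : k < g.length := by omega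
      rw [PySem.List.pyRange_one_cons (by omega), List.foldr_cons,
        show ((k : Int) + 1) = (((k+1 : Nat) : Int)) by push_cast; ring,
        ih (k+1) (by omega)]
      show (PySem.List.pyRange ((Cn : Int) - 1) (-1) (-1)).foldl
          (pvColStep (g.length : Int) (Cn : Int) (k : Int))
          (g.take (k+1) ++ wideS Cn (g.drop (k+1)))
        = g.take k ++ wideS Cn (g.drop k)
      have hreslen : (g.take (k+1) ++ wideS Cn (g.drop (k+1))).length = g.length := by
        rw [List.length_append, List.length_take, wideS_length, List.length_drop]; omega
      have hkt : (g.take (k+1)).length = k + 1 := by rw [List.length_take]; omega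
      have hrowM : (g.take (k+1) ++ wideS Cn (g.drop (k+1))).getD k [] = g.getD k [] := by
        rw [getD_append_left' _ _ k [] (by omega), getD_take' g (k+1) k [] (by omega)]
      have hrl : Cn ≤ (g.getD k []).length := by
        rw [List.getD_eq_getElem g [] hkR]; exact hge _ (List.getElem_mem hkR)
      have hSl : (sufSpec ((g.getD k []).take Cn)).length = Cn := by
        rw [sufSpec_length, List.length_take]; omega
      have hSd : ∀ c : Nat, c < Cn → (sufSpec ((g.getD k []).take Cn)).getD c 0
          = (g.getD k []).getD c 0 +
            (if c + 1 < Cn then (sufSpec ((g.getD k []).take Cn)).getD (c+1) 0 else 0) := by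
        intro c hc
        have h := sufSpec_getD ((g.getD k []).take Cn) c
          (by rw [List.length_take]; omega)
        rw [List.length_take, show min Cn (g.getD k []).length = Cn by omega,
          getD_take' _ Cn c 0 (by omega)] at h
        exact h
      have hsplit : g.take (k+1) ++ wideS Cn (g.drop (k+1))
          = g.take k ++ g.getD k [] :: wideS Cn (g.drop (k+1)) := by
        have h1 : g.take (k+1) = g.take k ++ [g.getD k []] := by
          rw [List.take_add_one, List.getElem?_eq_getElem hkR,
            List.getD_eq_getElem g [] hkR]
          simp
        rw [h1, List.append_assoc, List.singleton_append]
      have hlenk : (g.take k).length = k := by rw [List.length_take]; omega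
      have hdropk : g.drop k = g.getD k [] :: g.drop (k+1) := by
        rw [List.getD_eq_getElem g [] hkR]; exact List.drop_eq_getElem_cons hkR
      rw [show ((g.length : Int)) = (((g.take (k+1) ++ wideS Cn (g.drop (k+1))).length : Int)) by
        rw [hreslen]]
      by_cases hlast : k + 1 < g.length
      · have hdrop1 : g.drop (k+1) = g.getD (k+1) [] :: g.drop (k+2) := by
          rw [List.getD_eq_getElem g [] (by omega)]
          exact List.drop_eq_getElem_cons (by omega)
        have hcore1 : coreS Cn (g.drop (k+1))
            = (match coreS Cn (g.drop (k+2)) with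
                | [] => sufSpec ((g.getD (k+1) []).take Cn)
                | h :: _ => addRows (sufSpec ((g.getD (k+1) []).take Cn)) h)
              :: coreS Cn (g.drop (k+2)) := by
          rw [hdrop1]
          rfl
        have hwide1 : wideS Cn (g.drop (k+1))
            = ((match coreS Cn (g.drop (k+2)) with
                | [] => sufSpec ((g.getD (k+1) []).take Cn)
                | h :: _ => addRows (sufSpec ((g.getD (k+1) []).take Cn)) h)
                ++ (g.getD (k+1) []).drop Cn)
              :: wideS Cn (g.drop (k+2)) := by
          rw [hdrop1]
          rfl
        set b := (match coreS Cn (g.drop (k+2)) with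
            | [] => sufSpec ((g.getD (k+1) []).take Cn)
            | h :: _ => addRows (sufSpec ((g.getD (k+1) []).take Cn)) h) with hbdef
        have hbl : b.length = Cn :=
          coreS_rect Cn (g.drop (k+1)) (fun r hr => hge r (List.mem_of_mem_drop hr)) b
            (by rw [hcore1]; exact List.mem_cons_self)
        have hB : (g.take (k+1) ++ wideS Cn (g.drop (k+1))).getD (k+1) []
            = b ++ (g.getD (k+1) []).drop Cn := by
          rw [getD_append_right' _ _ (k+1) [] (by omega), hkt, Nat.sub_self, hwide1]
          rfl
        have hBread : ∀ c : Nat, c < Cn →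
            ((g.take (k+1) ++ wideS Cn (g.drop (k+1))).getD (k+1) []).getD c 0
              = b.getD c 0 := by
          intro c hc
          rw [hB, getD_append_left' _ _ c 0 (by omega)]
        set S := sufSpec ((g.getD k []).take Cn) with hSdef
        set T := addRows S b ++ (g.getD k []).drop Cn with hTdef
        have hXl : (addRows S b).length = Cn := by
          rw [addRows_length _ _ (by rw [hSl, hbl]), hSl]
        have hTl : T.length = (g.getD k []).length := by
          rw [hTdef, List.length_append, hXl, List.length_drop]; omega
        have hTt : T.drop Cn = (g.getD k []).drop Cn := by
          rw [hTdef, ← hXl, List.drop_left]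
        have hTread : ∀ c : Nat, c < Cn → T.getD c 0 = (addRows S b).getD c 0 := by
          intro c hc
          rw [hTdef, getD_append_left' _ _ c 0 (by omega)]
        have hcond : ((k : Int) + 1 < ((g.take (k+1) ++ wideS Cn (g.drop (k+1))).length : Int)) := by
          rw [hreslen]; exact_mod_cast hlast
        have hrec : ∀ c : Nat, c < Cn → T.getD c 0
            = (g.getD k []).getD c 0
            + (if (k : Int) + 1 < ((g.take (k+1) ++ wideS Cn (g.drop (k+1))).length : Int)
                then ((g.take (k+1) ++ wideS Cn (g.drop (k+1))).getD (k+1) []).getD c 0 else 0)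
            + (if (c : Int) + 1 < (Cn : Int)
                then T.getD (c+1) 0 else 0)
            - (if ((k : Int) + 1 < ((g.take (k+1) ++ wideS Cn (g.drop (k+1))).length : Int))
                  ∧ ((c : Int) + 1 < (Cn : Int))
                then ((g.take (k+1) ++ wideS Cn (g.drop (k+1))).getD (k+1) []).getD (c+1) 0 else 0) := by
          intro c hc
          rw [if_pos hcond]
          simp only [hcond, true_and]
          rw [hBread c hc, hTread c hc]
          by_cases hc1 : c + 1 < Cn
          · rw [if_pos (by exact_mod_cast hc1 : (c : Int) + 1 < (Cn : Int)),
              if_pos (by exact_mod_cast hc1 : (c : Int) + 1 < (Cn : Int)),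
              hBread (c+1) hc1, hTread (c+1) hc1,
              addRows_getD _ _ (by rw [hSl, hbl]) c (by rw [hSl]; omega),
              addRows_getD _ _ (by rw [hSl, hbl]) (c+1) (by rw [hSl]; omega)]
            have h := hSd c hc
            rw [if_pos hc1] at h
            rw [h]; ring
          · rw [if_neg (by omega : ¬ ((c : Int) + 1 < (Cn : Int))),
              if_neg (by omega : ¬ ((c : Int) + 1 < (Cn : Int))),
              addRows_getD _ _ (by rw [hSl, hbl]) c (by rw [hSl]; omega)]
            have h := hSd c hc
            rw [if_neg hc1] at h
            rw [h]; ring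
        rw [inner_loop Cn _ k (by omega) (g.getD k []) T hrowM hrl hTl hTt hrec, hsplit]
        have h3 := set_middle (g.take k) (g.getD k []) T (wideS Cn (g.drop (k+1)))
        rw [hlenk] at h3
        rw [h3, hdropk]
        simp only [wideS, hcore1]
        rw [hTdef, hSdef]
      · have hdnil : g.drop (k+1) = [] := List.drop_eq_nil_of_le (by omega)
        set S := sufSpec ((g.getD k []).take Cn) with hSdef
        set T := S ++ (g.getD k []).drop Cn with hTdef
        have hTl : T.length = (g.getD k []).length := by
          rw [hTdef, List.length_append, hSl, List.length_drop]; omega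
        have hTt : T.drop Cn = (g.getD k []).drop Cn := by
          rw [hTdef, ← hSl, List.drop_left]
        have hTread : ∀ c : Nat, c < Cn → T.getD c 0 = S.getD c 0 := by
          intro c hc
          rw [hTdef, getD_append_left' _ _ c 0 (by omega)]
        have hcond : ¬ ((k : Int) + 1 < ((g.take (k+1) ++ wideS Cn (g.drop (k+1))).length : Int)) := by
          rw [hreslen]; omega
        have hrec : ∀ c : Nat, c < Cn → T.getD c 0
            = (g.getD k []).getD c 0
            + (if (k : Int) + 1 < ((g.take (k+1) ++ wideS Cn (g.drop (k+1))).length : Int)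
                then ((g.take (k+1) ++ wideS Cn (g.drop (k+1))).getD (k+1) []).getD c 0 else 0)
            + (if (c : Int) + 1 < (Cn : Int)
                then T.getD (c+1) 0 else 0)
            - (if ((k : Int) + 1 < ((g.take (k+1) ++ wideS Cn (g.drop (k+1))).length : Int))
                  ∧ ((c : Int) + 1 < (Cn : Int))
                then ((g.take (k+1) ++ wideS Cn (g.drop (k+1))).getD (k+1) []).getD (c+1) 0 else 0) := by
          intro c hc
          rw [if_neg hcond]
          simp only [hcond, false_and, if_false, add_zero, sub_zero]
          rw [hTread c hc]
          have h := hSd c hc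
          by_cases hc1 : c + 1 < Cn
          · rw [if_pos (by exact_mod_cast hc1 : (c : Int) + 1 < (Cn : Int)), hTread (c+1) hc1]
            rw [if_pos hc1] at h
            exact h
          · rw [if_neg (by omega : ¬ ((c : Int) + 1 < (Cn : Int)))]
            rw [if_neg hc1] at h
            simpa using h
        rw [inner_loop Cn _ k (by omega) (g.getD k []) T hrowM hrl hTl hTt hrec, hsplit]
        have h3 := set_middle (g.take k) (g.getD k []) T (wideS Cn (g.drop (k+1)))
        rw [hlenk] at h3
        rw [h3, hdropk]
        simp only [wideS, hdnil, coreS]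
        rw [hTdef, hSdef]

theorem a_eq_wideS (g : List (List Int)) (_hne : g ≠ [])
    (hge : ∀ row ∈ g, (g.headD []).length ≤ row.length) :
    backward_sum g = wideS ((g.headD []).length) g := by
  unfold backward_sum
  show (PySem.List.pyRange ((g.length : Int) - 1) (-1) (-1)).foldl
      (fun res r => (PySem.List.pyRange (((g.headD []).length : Int) - 1) (-1) (-1)).foldl
        (pvColStep (g.length : Int) ((g.headD []).length : Int) r) res)
      (g.map (fun row => row)) = wideS ((g.headD []).length) g
  rw [List.map_id']
  have e1 : ((g.length : Int) - 1) + 1 = (g.length : Int) := by ring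
  have e2 : ((-1 : Int)) + 1 = 0 := by norm_num
  rw [PySem.List.pyRange_neg_one_eq_reverse ((g.length : Int) - 1) (-1), e1, e2,
    List.foldl_reverse]
  have h := outer_loop g ((g.headD []).length) hge g.length 0 (by omega)
  simpa using h

-- ---- B-side lemmas are below (pass1_eq, pass2_row, pass2_outer, alt_eq_wideS) ----

theorem pvPass1Step_eq (row : List Int) (c : Nat) :
    pvPass1Step row (c : Int) = row.set c (row.getD c 0 + row.getD (c+1) 0) := by
  unfold pvPass1Step
  rw [show ((c : Int)).toNat = c by omega, show ((c : Int) + 1).toNat = c + 1 by omega]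

theorem pvRowAdd_eq (res : List (List Int)) (k c : Nat) :
    pvRowAdd res (k : Int) (c : Int)
      = pvSet2 res k c (pvGet2 res k c + pvGet2 res (k+1) c) := by
  unfold pvRowAdd
  rw [show ((k : Int)).toNat = k by omega, show ((c : Int)).toNat = c by omega,
    show ((k : Int) + 1).toNat = k + 1 by omega]

-- the set that turns "prefix of row, suffix of T" at index c into index-c form
theorem set_take_drop (row T : List Int) (c : Nat) (hcr : c < row.length) (hcT : c < T.length) :
    (row.take (c+1) ++ T.drop (c+1)).set c (T.getD c 0) = row.take c ++ T.drop c := by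
  have h1 : row.take (c+1) = row.take c ++ [row.getD c 0] := by
    rw [List.take_add_one, List.getElem?_eq_getElem hcr, List.getD_eq_getElem row 0 hcr]
    simp
  have hgT : T.getD c 0 = T[c]'hcT := List.getD_eq_getElem T 0 hcT
  have h2 : T.drop c = T.getD c 0 :: T.drop (c+1) := by
    rw [hgT]; exact List.drop_eq_getElem_cons hcT
  have hlen : (row.take c).length = c := by rw [List.length_take]; omega
  have h3 := set_middle (row.take c) (row.getD c 0) (T.getD c 0) (T.drop (c+1))
  rw [hlen] at h3
  rw [h1, List.append_assoc, List.singleton_append, h3, h2]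

theorem pass1_eq (Cn : Nat) (row : List Int) (hrl : Cn ≤ row.length) :
    pvPass1 (Cn : Int) row = sufSpec (row.take Cn) ++ row.drop Cn := by
  unfold pvPass1
  rw [PySem.List.pyRange_neg_one_eq_reverse, show (-1 : Int) + 1 = 0 by norm_num,
    show ((Cn : Int) - 2) + 1 = (Cn : Int) - 1 by ring, List.foldl_reverse]
  rcases Nat.eq_zero_or_pos Cn with h0 | hpos
  · subst h0
    rw [PySem.List.pyRange_one_eq_nil (by norm_num)]
    simp [sufSpec]
  have hSl : (sufSpec (row.take Cn)).length = Cn := by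
    rw [sufSpec_length, List.length_take]; omega
  set T := sufSpec (row.take Cn) ++ row.drop Cn with hT
  have hTl : T.length = row.length := by
    rw [hT, List.length_append, hSl, List.length_drop]; omega
  have hTc : ∀ c : Nat, c < Cn → T.getD c 0 = (sufSpec (row.take Cn)).getD c 0 := by
    intro c hc
    rw [hT, getD_append_left' _ _ c 0 (by omega)]
  have hTrec : ∀ c : Nat, c + 1 < Cn → T.getD c 0 = row.getD c 0 + T.getD (c+1) 0 := by
    intro c hc
    rw [hTc c (by omega), hTc (c+1) (by omega)]
    have h := sufSpec_getD (row.take Cn) c (by rw [List.length_take]; omega)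
    rw [List.length_take, show min Cn row.length = Cn by omega, if_pos hc,
      getD_take' row Cn c 0 (by omega)] at h
    exact h
  have hTlast : T.getD (Cn-1) 0 = row.getD (Cn-1) 0 := by
    rw [hTc (Cn-1) (by omega)]
    have h := sufSpec_getD (row.take Cn) (Cn-1) (by rw [List.length_take]; omega)
    rw [List.length_take, show min Cn row.length = Cn by omega,
      if_neg (by omega : ¬ (Cn - 1 + 1 < Cn)), getD_take' row Cn (Cn-1) 0 (by omega)] at h
    simpa using h
  have hTdrop : T.drop Cn = row.drop Cn := by
    rw [hT]; exact List.drop_left' hSl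
  have hinv : ∀ (m c : Nat), c + m + 1 = Cn →
      (PySem.List.pyRange (c : Int) ((Cn : Int) - 1) 1).foldr
        (fun cc rw => pvPass1Step rw cc) row = row.take c ++ T.drop c := by
    intro m
    induction m with
    | zero =>
        intro c hceq
        have hc : c = Cn - 1 := by omega
        subst hc
        rw [PySem.List.pyRange_one_eq_nil (by omega)]
        simp only [List.foldr_nil]
        have h2 : T.drop (Cn-1) = row.getD (Cn-1) 0 :: row.drop Cn := by
          rw [show T.drop (Cn-1) = T.getD (Cn-1) 0 :: T.drop (Cn-1+1) by
              rw [List.getD_eq_getElem T 0 (by omega)]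
              exact List.drop_eq_getElem_cons (by omega),
            show Cn - 1 + 1 = Cn by omega, hTdrop, hTlast]
        have h3 : row.drop (Cn-1) = row.getD (Cn-1) 0 :: row.drop Cn := by
          rw [show row.drop (Cn-1) = row.getD (Cn-1) 0 :: row.drop (Cn-1+1) by
              rw [List.getD_eq_getElem row 0 (by omega)]
              exact List.drop_eq_getElem_cons (by omega),
            show Cn - 1 + 1 = Cn by omega]
        rw [h2, ← h3, List.take_append_drop]
    | succ m ih =>
        intro c hceq
        rw [PySem.List.pyRange_one_cons (by omega), List.foldr_cons,
          show ((c : Int) + 1) = (((c+1 : Nat) : Int)) by push_cast; ring,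
          ih (c+1) (by omega), pvPass1Step_eq]
        have htl : (row.take (c+1)).length = c + 1 := by rw [List.length_take]; omega
        have hgc : (row.take (c+1) ++ T.drop (c+1)).getD c 0 = row.getD c 0 := by
          rw [getD_append_left' _ _ c 0 (by omega), getD_take' row (c+1) c 0 (by omega)]
        have hgc1 : (row.take (c+1) ++ T.drop (c+1)).getD (c+1) 0 = T.getD (c+1) 0 := by
          rw [getD_append_right' _ _ (c+1) 0 (by omega), htl, Nat.sub_self,
            List.getD_eq_getElem?_getD, List.getD_eq_getElem?_getD, List.getElem?_drop]
        rw [hgc, hgc1, ← hTrec c (by omega)]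
        exact set_take_drop row T c (by omega) (by omega)
  rw [show (0 : Int) = ((0 : Nat) : Int) by norm_num, hinv (Cn - 1) 0 (by omega)]
  simp [hT]

theorem pass2_row (Cn : Nat) (res : List (List Int)) (k : Nat) (hk : k < res.length)
    (S tail : List Int) (hS : res.getD k [] = S ++ tail) (hSl : S.length = Cn)
    (hBl : Cn ≤ (res.getD (k+1) []).length) :
    (PySem.List.pyRange 0 (Cn : Int) 1).foldl (fun r c => pvRowAdd r (k : Int) c) res
      = res.set k (addRows S ((res.getD (k+1) []).take Cn) ++ tail) := by
  set B0 := (res.getD (k+1) []).take Cn with hB0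
  have hB0l : B0.length = Cn := by rw [hB0, List.length_take]; omega
  set W := addRows S B0 with hW
  have hWl : W.length = Cn := by
    rw [hW, addRows_length _ _ (by rw [hSl, hB0l]), hSl]
  have hinv : ∀ (m c : Nat), c + m = Cn →
      (PySem.List.pyRange (c : Int) (Cn : Int) 1).foldl
        (fun r cc => pvRowAdd r (k : Int) cc)
        (res.set k (W.take c ++ (S ++ tail).drop c))
      = res.set k (W ++ tail) := by
    intro m
    induction m with
    | zero =>
        intro c hceq
        have hc : c = Cn := by omega
        subst hc
        rw [PySem.List.pyRange_one_eq_nil (by omega)]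
        simp only [List.foldl_nil]
        rw [List.take_of_length_le (by omega), List.drop_left' hSl]
    | succ m ih =>
        intro c hceq
        have hc : c < Cn := by omega
        rw [PySem.List.pyRange_one_cons (by omega), List.foldl_cons]
        have hUk : (res.set k (W.take c ++ (S ++ tail).drop c)).getD k []
            = W.take c ++ (S ++ tail).drop c := getD_set_self' res k _ [] hk
        have htl : (W.take c).length = c := by rw [List.length_take]; omega
        have hrowlen : c < ((res.set k (W.take c ++ (S ++ tail).drop c)).getD k []).length := by
          rw [hUk]
          simp only [List.length_append, List.length_take, List.length_drop]
          omega
        rw [pvRowAdd_eq]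
        have hgk : pvGet2 (res.set k (W.take c ++ (S ++ tail).drop c)) k c = S.getD c 0 := by
          unfold pvGet2
          rw [hUk, getD_append_right' _ _ c 0 (by omega), htl, Nat.sub_self,
            List.getD_eq_getElem?_getD, List.getD_eq_getElem?_getD, List.getElem?_drop,
            Nat.add_zero, ← List.getD_eq_getElem?_getD, ← List.getD_eq_getElem?_getD,
            getD_append_left' _ _ c 0 (by omega)]
        have hgk1 : pvGet2 (res.set k (W.take c ++ (S ++ tail).drop c)) (k+1) c
            = B0.getD c 0 := by
          unfold pvGet2
          rw [getD_set_ne' res k _ [] (k+1) (by omega), hB0,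
            getD_take' _ Cn c 0 (by omega)]
        have hWc : S.getD c 0 + B0.getD c 0 = W.getD c 0 := by
          rw [hW, addRows_getD _ _ (by rw [hSl, hB0l]) c (by omega)]
        have hset : pvSet2 (res.set k (W.take c ++ (S ++ tail).drop c)) k c (W.getD c 0)
            = res.set k ((W.take c ++ (S ++ tail).drop c).set c (W.getD c 0)) := by
          unfold pvSet2
          rw [hUk, List.set_set]
        have hstep : (W.take c ++ (S ++ tail).drop c).set c (W.getD c 0)
            = W.take (c+1) ++ (S ++ tail).drop (c+1) := by
          have h1 : W.take (c+1) = W.take c ++ [W.getD c 0] := by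
            rw [List.take_add_one, List.getElem?_eq_getElem (by omega : c < W.length),
              List.getD_eq_getElem W 0 (by omega : c < W.length)]
            simp
          have h2 : (S ++ tail).drop c = (S ++ tail).getD c 0 :: (S ++ tail).drop (c+1) := by
            rw [List.getD_eq_getElem (S ++ tail) 0 (by rw [List.length_append]; omega)]
            exact List.drop_eq_getElem_cons (by rw [List.length_append]; omega)
          have h3 := set_middle (W.take c) ((S ++ tail).getD c 0) (W.getD c 0)
            ((S ++ tail).drop (c+1))
          rw [htl] at h3
          rw [h2, h3, h1, List.append_assoc, List.singleton_append]
        rw [hgk, hgk1, hWc, hset, hstep,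
          show ((c : Int) + 1) = (((c+1 : Nat) : Int)) by push_cast; ring,
          ih (c+1) (by omega)]
  have h0 := hinv Cn 0 (by omega)
  simp only [List.take_zero, List.drop_zero, List.nil_append] at h0
  rw [← hS, set_getD_self' res k [] hk] at h0
  rw [show (0 : Int) = ((0 : Nat) : Int) by norm_num]
  exact h0

theorem pass2_outer (g : List (List Int)) (Cn : Nat)
    (hge : ∀ row ∈ g, Cn ≤ row.length) :
    ∀ (n k : Nat), k + n + 1 = g.length →
    (PySem.List.pyRange (k : Int) ((g.length : Int) - 1) 1).foldr
        (fun r res => (PySem.List.pyRange 0 (Cn : Int) 1).foldl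
          (fun res c => pvRowAdd res r c) res)
        (g.map (fun row => sufSpec (row.take Cn) ++ row.drop Cn))
      = (g.map (fun row => sufSpec (row.take Cn) ++ row.drop Cn)).take k
          ++ wideS Cn (g.drop k) := by
  set g1 := g.map (fun row => sufSpec (row.take Cn) ++ row.drop Cn) with hg1def
  have hg1len : g1.length = g.length := by rw [hg1def, List.length_map]
  have hg1 : ∀ j : Nat, j < g.length →
      g1.getD j [] = sufSpec ((g.getD j []).take Cn) ++ (g.getD j []).drop Cn := by
    intro j hj
    rw [hg1def, List.getD_eq_getElem _ [] (by rw [List.length_map]; omega),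
      List.getElem_map, List.getD_eq_getElem g [] hj]
  intro n
  induction n with
  | zero =>
      intro k hkeq
      rw [show PySem.List.pyRange (k : Int) ((g.length : Int) - 1) 1 = [] from
        PySem.List.pyRange_one_eq_nil (by omega)]
      simp only [List.foldr_nil]
      have hdropg : g.drop k = [g.getD k []] := by
        rw [List.getD_eq_getElem g [] (by omega),
          List.drop_eq_getElem_cons (by omega : k < g.length),
          List.drop_eq_nil_of_le (by omega)]
      have hdropg1 : g1.drop k = [g1.getD k []] := by
        rw [List.getD_eq_getElem g1 [] (by omega),
          List.drop_eq_getElem_cons (by omega : k < g1.length),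
          List.drop_eq_nil_of_le (by omega)]
      rw [hdropg, show wideS Cn [g.getD k []]
          = [sufSpec ((g.getD k []).take Cn) ++ (g.getD k []).drop Cn] by
            simp [wideS, coreS],
        ← hg1 k (by omega), ← hdropg1, List.take_append_drop]
  | succ n ih =>
      intro k hkeq
      have hkR : k + 1 < g.length := by omega
      rw [show PySem.List.pyRange (k : Int) ((g.length : Int) - 1) 1
            = (k : Int) :: PySem.List.pyRange ((k : Int) + 1) ((g.length : Int) - 1) 1 from
          PySem.List.pyRange_one_cons (by omega), List.foldr_cons,
        show ((k : Int) + 1) = (((k+1 : Nat) : Int)) by push_cast; ring,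
        ih (k+1) (by omega)]
      set res := g1.take (k+1) ++ wideS Cn (g.drop (k+1)) with hres
      have hreslen : res.length = g.length := by
        rw [hres, List.length_append, List.length_take, wideS_length, List.length_drop]
        omega
      have hkt : (g1.take (k+1)).length = k + 1 := by rw [List.length_take]; omega
      have hrl : Cn ≤ (g.getD k []).length := by
        rw [List.getD_eq_getElem g [] (by omega)]
        exact hge _ (List.getElem_mem (by omega))
      set S := sufSpec ((g.getD k []).take Cn) with hSdef
      set tl := (g.getD k []).drop Cn with htldef
      have hSl : S.length = Cn := by rw [hSdef, sufSpec_length, List.length_take]; omega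
      have hrowk : res.getD k [] = S ++ tl := by
        rw [hres, getD_append_left' _ _ k [] (by omega),
          getD_take' g1 (k+1) k [] (by omega), hg1 k (by omega)]
      have hdrop1 : g.drop (k+1) = g.getD (k+1) [] :: g.drop (k+2) := by
        rw [List.getD_eq_getElem g [] (by omega)]
        exact List.drop_eq_getElem_cons (by omega)
      have hcore1 : coreS Cn (g.drop (k+1))
          = (match coreS Cn (g.drop (k+2)) with
              | [] => sufSpec ((g.getD (k+1) []).take Cn)
              | h :: _ => addRows (sufSpec ((g.getD (k+1) []).take Cn)) h)
            :: coreS Cn (g.drop (k+2)) := by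
        rw [hdrop1]; rfl
      have hwide1 : wideS Cn (g.drop (k+1))
          = ((match coreS Cn (g.drop (k+2)) with
              | [] => sufSpec ((g.getD (k+1) []).take Cn)
              | h :: _ => addRows (sufSpec ((g.getD (k+1) []).take Cn)) h)
              ++ (g.getD (k+1) []).drop Cn)
            :: wideS Cn (g.drop (k+2)) := by
        rw [hdrop1]; rfl
      set b := (match coreS Cn (g.drop (k+2)) with
          | [] => sufSpec ((g.getD (k+1) []).take Cn)
          | h :: _ => addRows (sufSpec ((g.getD (k+1) []).take Cn)) h) with hbdef
      have hbl : b.length = Cn :=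
        coreS_rect Cn (g.drop (k+1)) (fun r hr => hge r (List.mem_of_mem_drop hr)) b
          (by rw [hcore1]; exact List.mem_cons_self)
      have hrowk1 : res.getD (k+1) [] = b ++ (g.getD (k+1) []).drop Cn := by
        rw [hres, getD_append_right' _ _ (k+1) [] (by omega), hkt, Nat.sub_self, hwide1]
        rfl
      have hBl : Cn ≤ (res.getD (k+1) []).length := by
        rw [hrowk1, List.length_append, hbl]; omega
      have hBtake : (res.getD (k+1) []).take Cn = b := by
        rw [hrowk1]; exact List.take_left' hbl
      rw [pass2_row Cn res k (by omega) S tl hrowk hSl hBl, hBtake]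
      have hsplit : res = g1.take k ++ (S ++ tl) :: wideS Cn (g.drop (k+1)) := by
        rw [hres, show g1.take (k+1) = g1.take k ++ [S ++ tl] by
            rw [List.take_add_one, List.getElem?_eq_getElem (by omega : k < g1.length),
              ← List.getD_eq_getElem g1 [] (by omega), hg1 k (by omega), ← hSdef, ← htldef]
            simp,
          List.append_assoc, List.singleton_append]
      have hlenk : (g1.take k).length = k := by rw [List.length_take]; omega
      have h3 := set_middle (g1.take k) (S ++ tl) (addRows S b ++ tl)
        (wideS Cn (g.drop (k+1)))
      rw [hlenk] at h3
      rw [hsplit, h3]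
      have hdropk : g.drop k = g.getD k [] :: g.drop (k+1) := by
        rw [List.getD_eq_getElem g [] (by omega)]
        exact List.drop_eq_getElem_cons (by omega)
      rw [hdropk]
      simp only [wideS, hcore1]
      rw [← hSdef, ← htldef]

theorem alt_eq_wideS (g : List (List Int)) (hne : g ≠ [])
    (hge : ∀ row ∈ g, (g.headD []).length ≤ row.length) :
    backward_sum_alt g = wideS ((g.headD []).length) g := by
  unfold backward_sum_alt
  show (PySem.List.pyRange ((g.length : Int) - 2) (-1) (-1)).foldl (fun res r =>
      (PySem.List.pyRange 0 (((g.headD []).length : Nat) : Int) 1).foldl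
        (fun res c => pvRowAdd res r c) res)
      (g.map (pvPass1 (((g.headD []).length : Nat) : Int)))
    = wideS ((g.headD []).length) g
  rw [List.map_congr_left (fun row hr => pass1_eq ((g.headD []).length) row (hge row hr))]
  rw [PySem.List.pyRange_neg_one_eq_reverse, show (-1 : Int) + 1 = 0 by norm_num,
    show ((g.length : Int) - 2) + 1 = (g.length : Int) - 1 by ring, List.foldl_reverse]
  have hlen : 1 ≤ g.length := List.length_pos_of_ne_nil hne
  have h := pass2_outer g ((g.headD []).length) hge (g.length - 1) 0 (by omega)
  rw [show (0 : Int) = ((0 : Nat) : Int) by norm_num]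
  simpa using h


-- ===== VERDICT (by name: the statement is the Claim_ definition above) =====
theorem backward_sum_spec : Claim_equal_backward_sum := by
  intro grid _ hpre
  unfold Spec_backward_sum
  rw [alt_eq_wideS grid hpre.1 hpre.2, a_eq_wideS grid hpre.1 hpre.2]
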